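-- pv_equiv track=rewrite | github.com/scientistkev/advent-of-code-2025 | challenges/day_9.py | connect_circuits
-- ===== SOURCE A (Python) =====
-- def find_closest_pairs(boxes):
--     closest_pairs = []
--     for i in range(len(boxes)):
--         for j in range(i + 1, len(boxes)):
--             # Calculate squared Euclidean distance for comparison (avoids floating point issues)
--             # Using squared distance preserves ordering and is faster
--             distance_sq = sum((a - b) ** 2 for a, b in zip(boxes[i], boxes[j]))
--             closest_pairs.append((i, j, distance_sq))
--     return closest_pairs
--
-- class UnionFind:
--     def __init__(self, n):
--         self.parent = list(range(n))
--         self.size = [1] * n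
--
--     def find(self, x):
--         if self.parent[x] != x:
--             self.parent[x] = self.find(self.parent[x])
--         return self.parent[x]
--
--     def union(self, x, y):
--         root_x = self.find(x)
--         root_y = self.find(y)
--         if root_x != root_y:
--             if self.size[root_x] < self.size[root_y]:
--                 root_x, root_y = root_y, root_x
--             self.parent[root_y] = root_x
--             self.size[root_x] += self.size[root_y]
--
-- def connect_circuits(boxes, num_connections=1000):
--     closest_pairs = find_closest_pairs(boxes)
--     # Sort by distance, then by i, then by j for consistent ordering of ties
--     closest_pairs.sort(key=lambda x: (x[2], x[0], x[1]))
--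
--     uf = UnionFind(len(boxes))
--
--     # Process exactly num_connections pairs (even if they don't result in a merge)
--     for i, j, distance in closest_pairs[:num_connections]:
--         if uf.find(i) != uf.find(j):
--             uf.union(i, j)
--
--     # Count circuit sizes by finding the root of each box and counting
--     circuit_sizes = {}
--     for i in range(len(boxes)):
--         root = uf.find(i)
--         circuit_sizes[root] = circuit_sizes.get(root, 0) + 1
--
--     return list(circuit_sizes.values())
-- ===== SOURCE B (Python) =====
-- def connect_circuits(boxes, num_connections=1000):
--     n = len(boxes)
--     pairs = []
--     for i in range(n):
--         for j in range(i + 1, n):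
--             d = sum((a - b) ** 2 for a, b in zip(boxes[i], boxes[j]))
--             pairs.append((d, i, j))
--     pairs.sort()
--     comp = list(range(n))
--     size = [1] * n
--     for _, i, j in pairs[:num_connections]:
--         ri, rj = comp[i], comp[j]
--         if ri != rj:
--             if size[ri] < size[rj]:
--                 ri, rj = rj, ri
--             comp = [ri if c == rj else c for c in comp]
--             size[ri] += size[rj]
--     out = []
--     seen = set()
--     for i in range(n):
--         r = comp[i]
--         if r not in seen:
--             seen.add(r)
--             out.append(size[r])
--     return out
-- ===== Notes on version B (the rewrite author's own statement) =====
-- stated objective: simpler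
-- what changed: Replaces the recursive path-compressing UnionFind class and the root-counting dict by a flat component-label array merged by eager relabeling (size-biased), with sizes maintained directly and emitted at each label's first occurrence.
import Mathlib
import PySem

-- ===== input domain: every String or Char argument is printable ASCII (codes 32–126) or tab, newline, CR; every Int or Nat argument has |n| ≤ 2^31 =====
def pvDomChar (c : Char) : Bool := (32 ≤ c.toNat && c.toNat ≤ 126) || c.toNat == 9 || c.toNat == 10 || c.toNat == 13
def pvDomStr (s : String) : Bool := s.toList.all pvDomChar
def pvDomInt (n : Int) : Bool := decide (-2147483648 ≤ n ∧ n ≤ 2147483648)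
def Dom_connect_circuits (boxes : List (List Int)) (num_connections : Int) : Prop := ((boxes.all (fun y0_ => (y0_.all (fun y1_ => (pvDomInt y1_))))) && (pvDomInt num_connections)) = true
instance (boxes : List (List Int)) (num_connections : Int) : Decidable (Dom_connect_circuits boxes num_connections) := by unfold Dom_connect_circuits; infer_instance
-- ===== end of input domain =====

-- ===== PORT A =====
-- B is an eager flat-label union (relabel scan) instead of A's parent-forest union-find; same return value.
-- (shared) squared-distance: sum((a-b)**2 for a,b in zip(u,v))
def pvDist (u v : List Int) : Int :=
  (List.zip u v).foldl (fun s ab => s + (ab.1 - ab.2) ^ 2) 0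

-- find_closest_pairs: double loop appending (i, j, distance_sq)
def find_closest_pairs (boxes : List (List Int)) : List (Int × Int × Int) :=
  (PySem.List.pyRange 0 (PySem.List.len boxes) 1).foldl (fun acc i =>
    (PySem.List.pyRange (i + 1) (PySem.List.len boxes) 1).foldl (fun acc2 j =>
      acc2 ++ [(i, j, pvDist (PySem.List.pyGetD boxes i []) (PySem.List.pyGetD boxes j []))]) acc) []

-- key (x[2], x[0], x[1]) compared as a Python tuple (lexicographic, written out:
-- Lean's Prod '<' is not lexicographic); exact for Python's tuple '<' on int triples
def pvKeyLtA (a b : Int × Int × Int) : Bool :=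
  decide (a.2.2 < b.2.2 ∨ (a.2.2 = b.2.2 ∧ (a.1 < b.1 ∨ (a.1 = b.1 ∧ a.2.1 < b.2.1))))

-- list.sort(key=...) : stable sort, the foldl/insertBy shape of PySem.List.sorted
-- (PySem.List.sorted_eq_foldl_insertBy) with the lexicographic key comparison above; exact
def pvSortA (xs : List (Int × Int × Int)) : List (Int × Int × Int) :=
  xs.foldl (fun acc x => PySem.List.insertBy pvKeyLtA x acc) []

-- UnionFind.find with path compression; recursion bounded by fuel = len(parent),
-- which always suffices on the states A builds (chain depth < number of nodes)
def ufFind : Nat → List Int → Int → List Int × Int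
  | 0, p, x => (p, x)
  | fuel+1, p, x =>
    let px := PySem.List.pyGetD p x x
    if px ≠ x then
      let pr := ufFind fuel p px
      (PySem.List.pySetD pr.1 x pr.2, pr.2)
    else (p, x)

-- UnionFind.union (union by size)
def ufUnion (p sz : List Int) (x y : Int) : List Int × List Int :=
  let f1 := ufFind p.length p x
  let f2 := ufFind f1.1.length f1.1 y
  let rootx := f1.2
  let rooty := f2.2
  if rootx ≠ rooty then
    let pr := if PySem.List.pyGetD sz rootx 0 < PySem.List.pyGetD sz rooty 0
              then (rooty, rootx) else (rootx, rooty)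
    (PySem.List.pySetD f2.1 pr.2 pr.1,
     PySem.List.pySetD sz pr.1 (PySem.List.pyGetD sz pr.1 0 + PySem.List.pyGetD sz pr.2 0))
  else (f2.1, sz)

def connect_circuits (boxes : List (List Int)) (num_connections : Int) : List Int :=
  let closest_pairs := pvSortA (find_closest_pairs boxes)
  let n := boxes.length
  -- for i, j, _ in closest_pairs[:num_connections]: if uf.find(i) != uf.find(j): uf.union(i, j)
  let st := (PySem.List.slice closest_pairs none (some num_connections)).foldl
    (fun st t =>
      let f1 := ufFind st.1.length st.1 t.1
      let f2 := ufFind f1.1.length f1.1 t.2.1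
      if f1.2 ≠ f2.2 then ufUnion f2.1 st.2 t.1 t.2.1 else (f2.1, st.2))
    (PySem.List.pyRange 0 (n : Int) 1, List.replicate n (1 : Int))
  -- circuit_sizes[root] = circuit_sizes.get(root, 0) + 1  over i in range(n)
  let fin := (PySem.List.pyRange 0 (n : Int) 1).foldl
    (fun st i =>
      let f := ufFind st.1.length st.1 i
      (f.1, st.2.insert f.2 (st.2.getD f.2 0 + 1)))
    (st.1, (PySem.Dict.empty : PySem.Dict Int Int))
  fin.2.values

-- ===== PORT B =====
-- pairs built as (distance, i, j)
def pvPairsB (boxes : List (List Int)) : List (Int × Int × Int) :=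
  (PySem.List.pyRange 0 (PySem.List.len boxes) 1).foldl (fun acc i =>
    (PySem.List.pyRange (i + 1) (PySem.List.len boxes) 1).foldl (fun acc2 j =>
      acc2 ++ [(pvDist (PySem.List.pyGetD boxes i []) (PySem.List.pyGetD boxes j []), i, j)]) acc) []

-- plain tuple comparison (d, i, j) < (d', i', j'), written out lexicographically; exact
def pvLtB (a b : Int × Int × Int) : Bool :=
  decide (a.1 < b.1 ∨ (a.1 = b.1 ∧ (a.2.1 < b.2.1 ∨ (a.2.1 = b.2.1 ∧ a.2.2 < b.2.2))))

-- pairs.sort(): stable sort in the same foldl/insertBy shape, keyless tuple comparison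
def pvSortB (xs : List (Int × Int × Int)) : List (Int × Int × Int) :=
  xs.foldl (fun acc x => PySem.List.insertBy pvLtB x acc) []

def connect_circuits_alt (boxes : List (List Int)) (num_connections : Int) : List Int :=
  let n := boxes.length
  let pairs := pvSortB (pvPairsB boxes)
  -- flat-label merge: comp = [ri if c == rj else c for c in comp]
  let st := (PySem.List.slice pairs none (some num_connections)).foldl
    (fun st t =>
      let ri := PySem.List.pyGetD st.1 t.2.1 0
      let rj := PySem.List.pyGetD st.1 t.2.2 0
      if ri ≠ rj then
        let pr := if PySem.List.pyGetD st.2 ri 0 < PySem.List.pyGetD st.2 rj 0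
                  then (rj, ri) else (ri, rj)
        (st.1.map (fun c => if c = pr.2 then pr.1 else c),
         PySem.List.pySetD st.2 pr.1 (PySem.List.pyGetD st.2 pr.1 0 + PySem.List.pyGetD st.2 pr.2 0))
      else st)
    (PySem.List.pyRange 0 (n : Int) 1, List.replicate n (1 : Int))
  -- emit size[r] at the first occurrence of each label r, scanning i = 0..n-1
  let fin := (PySem.List.pyRange 0 (n : Int) 1).foldl
    (fun acc i =>
      let r := PySem.List.pyGetD st.1 i 0
      if r ∈ acc.2 then acc
      else (acc.1 ++ [PySem.List.pyGetD st.2 r 0], PySem.Set.add acc.2 r))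
    ([], (PySem.Set.empty : PySem.Set Int))
  fin.1

-- ===== PRECONDITION & SPEC =====
def Spec_connect_circuits (boxes : List (List Int)) (num_connections : Int) (out : List Int) : Prop := out = connect_circuits_alt boxes num_connections
instance (boxes : List (List Int)) (num_connections : Int) (out : List Int) : Decidable (Spec_connect_circuits boxes num_connections out) := by unfold Spec_connect_circuits; infer_instance

-- ===== CLAIM (what is proved, stated in full; the proofs are below) =====
def Claim_equal_connect_circuits : Prop := ∀ (boxes : List (List Int)) (num_connections : Int), Dom_connect_circuits boxes num_connections → Spec_connect_circuits boxes num_connections (connect_circuits boxes num_connections)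


-- ===== LEMMAS AND PROOFS =====

-- Indexing helpers: nonnegative Int indices into lists, getD form
theorem pvGetD_lt {p : List Int} {x : Int} (d : Int) (h0 : 0 ≤ x) (hl : x < p.length) :
    PySem.List.pyGetD p x d = p.getD x.toNat 0 := by
  rw [PySem.List.pyGetD_eq_getElem p d h0 (by simpa using hl)]
  rw [List.getD_eq_getElem p 0 (by omega : x.toNat < p.length)]

theorem pvGetD_ge {p : List Int} {x : Int} (d : Int) (_h0 : 0 ≤ x) (hl : ¬ x < p.length) :
    PySem.List.pyGetD p x d = d := by
  apply PySem.List.pyGetD_of_none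
  rw [PySem.List.pyGet?_eq_none_iff, PySem.Raise.InRange]
  omega

theorem pvSet_len {p : List Int} (x v : Int) : (PySem.List.pySetD p x v).length = p.length :=
  PySem.List.length_pySetD _ _ _

theorem pvGet_set_self {p : List Int} {x : Int} (v d : Int) (h0 : 0 ≤ x) (hl : x < p.length) :
    PySem.List.pyGetD (PySem.List.pySetD p x v) x d = v := by
  rw [PySem.List.pySetD_of_nonneg p v h0]
  have hl' : x < ((p.set x.toNat v).length : Int) := by simp; omega
  rw [pvGetD_lt d h0 hl']
  rw [List.getD_eq_getElem _ 0 (by simp; omega)]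
  exact List.getElem_set_self _

theorem pvGet_set_ne {p : List Int} {x y : Int} (v d : Int) (hx0 : 0 ≤ x) (hy0 : 0 ≤ y)
    (hne : y ≠ x) :
    PySem.List.pyGetD (PySem.List.pySetD p x v) y d = PySem.List.pyGetD p y d := by
  rw [PySem.List.pySetD_of_nonneg p v hx0]
  by_cases hyl : y < (p.length : Int)
  · have hyl' : y < ((p.set x.toNat v).length : Int) := by simp; omega
    rw [pvGetD_lt d hy0 hyl', pvGetD_lt d hy0 hyl]
    rw [List.getD_eq_getElem (p.set x.toNat v) 0 (n := y.toNat) (by simp; omega)]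
    rw [List.getD_eq_getElem p 0 (n := y.toNat) (by omega)]
    exact List.getElem_set_ne (i := x.toNat) (j := y.toNat) (by omega) _
  · have hyl' : ¬ y < ((p.set x.toNat v).length : Int) := by simp; omega
    rw [pvGetD_ge d hy0 hyl', pvGetD_ge d hy0 hyl]

-- Bounds predicate on a parent array
def pvBnd (p : List Int) : Prop :=
  ∀ k : Nat, k < p.length → 0 ≤ p.getD k 0 ∧ p.getD k 0 < (p.length : Int)

-- "x reaches root r in at most k steps" for a parent array (Python's find chain)
inductive pvReach (p : List Int) : Nat → Int → Int → Prop
  | root (k : Nat) (x : Int) : PySem.List.pyGetD p x x = x → pvReach p k x x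
  | step (k : Nat) (x r : Int) : PySem.List.pyGetD p x x ≠ x →
      pvReach p k (PySem.List.pyGetD p x x) r → pvReach p (k + 1) x r

theorem pvReach_mono {p : List Int} {k m : Nat} {x r : Int}
    (h : pvReach p k x r) (hkm : k ≤ m) : pvReach p m x r := by
  induction h generalizing m with
  | root k x hx => exact pvReach.root m x hx
  | step k x r hx _ ih =>
    obtain ⟨m', rfl⟩ : ∃ m', m = m' + 1 := ⟨m - 1, by omega⟩
    exact pvReach.step m' x r hx (ih (by omega))

theorem pvReach_root_fix {p : List Int} {k : Nat} {x r : Int}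
    (h : pvReach p k x r) : PySem.List.pyGetD p r r = r := by
  induction h with
  | root _ _ hx => exact hx
  | step _ _ _ _ _ ih => exact ih

theorem pvReach_det {p : List Int} {k k' : Nat} {x r r' : Int}
    (h : pvReach p k x r) (h' : pvReach p k' x r') : r = r' := by
  induction h generalizing k' with
  | root _ x hx =>
    cases h' with
    | root => rfl
    | step _ _ _ hx' _ => exact absurd hx hx'
  | step _ x r hx _ ih =>
    cases h' with
    | root _ _ hx' => exact absurd hx' hx
    | step _ _ _ _ hsub => exact ih hsub

theorem pvReach_bounds {p : List Int} {k : Nat} {x r : Int} (hB : pvBnd p)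
    (hx0 : 0 ≤ x) (hxl : x < p.length) (h : pvReach p k x r) :
    0 ≤ r ∧ r < p.length := by
  induction h with
  | root _ x _ => exact ⟨hx0, hxl⟩
  | step _ x r hx hsub ih =>
    by_cases hl : x < (p.length : Int)
    · rw [pvGetD_lt x hx0 hl] at hx hsub ih
      obtain ⟨h1, h2⟩ := hB x.toNat (by omega)
      exact ih h1 h2
    · rw [pvGetD_ge x hx0 hl] at hx
      exact absurd rfl hx


theorem pvSetD_getD {q : List Int} {x : Int} (v : Int) (k : Nat) (hx0 : 0 ≤ x)
    (hk : k < q.length) :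
    (PySem.List.pySetD q x v).getD k 0 = if (k : Int) = x then v else q.getD k 0 := by
  rw [PySem.List.pySetD_of_nonneg q v hx0]
  by_cases hkx : (k : Int) = x
  · rw [if_pos hkx]
    rw [List.getD_eq_getElem _ 0 (n := k) (by simp; omega)]
    have : k = x.toNat := by omega
    subst this
    exact List.getElem_set_self _
  · rw [if_neg hkx]
    rw [List.getD_eq_getElem _ 0 (n := k) (by simp; omega)]
    rw [List.getD_eq_getElem q 0 (n := k) hk]
    exact List.getElem_set_ne (i := x.toNat) (j := k) (by omega) _

-- setting a non-root node's parent to its own root preserves every reach fact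
theorem pvReach_set_root {q : List Int} {x r : Int} (hB : pvBnd q)
    (hx0 : 0 ≤ x) (hxl : x < (q.length : Int)) (hr0 : 0 ≤ r)
    (hrroot : PySem.List.pyGetD q r r = r) (hxr : x ≠ r)
    (hnr : PySem.List.pyGetD q x x ≠ x)
    (hnext : ∀ (d : Nat) (s : Int), pvReach q d (PySem.List.pyGetD q x x) s → s = r) :
    ∀ (d : Nat) (z s : Int), 0 ≤ z → pvReach q d z s →
      pvReach (PySem.List.pySetD q x r) d z s := by
  intro d z s hz0 h
  induction h with
  | root d y hy =>
    by_cases hyx : y = x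
    · subst hyx; exact absurd hy hnr
    · exact pvReach.root d y (by rw [pvGet_set_ne r y hx0 hz0 hyx]; exact hy)
  | step d y s hyne hsub ih =>
    have hyl : y < (q.length : Int) := by
      by_contra hcon
      exact hyne (pvGetD_ge y hz0 hcon)
    have hnext0 : 0 ≤ PySem.List.pyGetD q y y := by
      rw [pvGetD_lt y hz0 hyl]
      exact (hB y.toNat (by omega)).1
    by_cases hyx : y = x
    · subst hyx
      have hs : s = r := hnext _ _ hsub
      rw [hs]
      have e1 : PySem.List.pyGetD (PySem.List.pySetD q y r) y y = r :=
        pvGet_set_self r y hz0 (by omega)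
      have e2 : PySem.List.pyGetD (PySem.List.pySetD q y r) r r = r := by
        rw [pvGet_set_ne r r hz0 hr0 (fun h => hxr h.symm)]
        exact hrroot
      refine pvReach_mono (pvReach.step 0 y r ?_ ?_) (by omega)
      · rw [e1]; exact fun h => hxr h.symm
      · rw [e1]; exact pvReach.root 0 r e2
    · have hedge : PySem.List.pyGetD (PySem.List.pySetD q x r) y y = PySem.List.pyGetD q y y :=
        pvGet_set_ne r y hx0 hz0 hyx
      refine pvReach.step d y s ?_ ?_
      · rw [hedge]; exact hyne
      · rw [hedge]; exact ih hnext0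

-- linking root ry under root rx: reach facts survive, roots ry are rerouted to rx
theorem pvReach_set_union {p : List Int} {rx ry : Int} (hB : pvBnd p)
    (hrx0 : 0 ≤ rx) (hry0 : 0 ≤ ry) (hryl : ry < (p.length : Int))
    (hrxr : PySem.List.pyGetD p rx rx = rx) (hryr : PySem.List.pyGetD p ry ry = ry)
    (hne : rx ≠ ry) :
    ∀ (d : Nat) (z s : Int), 0 ≤ z → pvReach p d z s →
      (s ≠ ry → pvReach (PySem.List.pySetD p ry rx) d z s) ∧
      (s = ry → pvReach (PySem.List.pySetD p ry rx) (d + 1) z rx) := by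
  intro d z s hz0 h
  induction h with
  | root d y hy =>
    by_cases hyry : y = ry
    · refine ⟨fun hc => absurd hyry hc, fun _ => ?_⟩
      rw [hyry]
      have e1 : PySem.List.pyGetD (PySem.List.pySetD p ry rx) ry ry = rx :=
        pvGet_set_self rx ry hry0 (by omega)
      have e2 : PySem.List.pyGetD (PySem.List.pySetD p ry rx) rx rx = rx := by
        rw [pvGet_set_ne rx rx hry0 hrx0 hne]
        exact hrxr
      refine pvReach_mono (pvReach.step 0 ry rx ?_ ?_) (by omega)
      · rw [e1]; exact fun h => hne h
      · rw [e1]; exact pvReach.root 0 rx e2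
    · refine ⟨fun _ => ?_, fun hc => absurd hc hyry⟩
      exact pvReach.root d y (by rw [pvGet_set_ne rx y hry0 hz0 hyry]; exact hy)
  | step d y s hyne hsub ih =>
    have hyl : y < (p.length : Int) := by
      by_contra hcon
      exact hyne (pvGetD_ge y hz0 hcon)
    have hnext0 : 0 ≤ PySem.List.pyGetD p y y := by
      rw [pvGetD_lt y hz0 hyl]
      exact (hB y.toNat (by omega)).1
    have hyry : y ≠ ry := by
      intro hc; subst hc; exact hyne hryr
    have hedge : PySem.List.pyGetD (PySem.List.pySetD p ry rx) y y = PySem.List.pyGetD p y y := by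
      rw [pvGet_set_ne rx y hry0 hz0 hyry]
    obtain ⟨ih1, ih2⟩ := ih hnext0
    constructor
    · intro hs
      refine pvReach.step d y s ?_ ?_
      · rw [hedge]; exact hyne
      · rw [hedge]; exact ih1 hs
    · intro hs
      refine pvReach.step (d + 1) y rx ?_ ?_
      · rw [hedge]; exact hyne
      · rw [hedge]; exact ih2 hs

-- full functional characterisation of A's find: returns the root, keeps lengths,
-- bounds, only writes the root value, and preserves every reach fact
theorem ufFind_spec (fuel : Nat) (p : List Int) (x r : Int)
    (hB : pvBnd p) (hx0 : 0 ≤ x) (hre : pvReach p fuel x r) :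
    (ufFind fuel p x).2 = r ∧
    (ufFind fuel p x).1.length = p.length ∧
    pvBnd (ufFind fuel p x).1 ∧
    (∀ k : Nat, k < p.length →
      (ufFind fuel p x).1.getD k 0 = p.getD k 0 ∨ (ufFind fuel p x).1.getD k 0 = r) ∧
    (∀ (d : Nat) (z s : Int), 0 ≤ z → pvReach p d z s →
      pvReach (ufFind fuel p x).1 d z s) := by
  induction fuel generalizing p x r with
  | zero =>
    cases hre with
    | root _ _ hx =>
      exact ⟨rfl, rfl, hB, fun k _ => Or.inl rfl, fun d z s _ h => h⟩
  | succ fuel ih =>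
    by_cases hpx : PySem.List.pyGetD p x x = x
    · have hfind : ufFind (fuel + 1) p x = (p, x) := by
        simp only [ufFind]
        rw [if_neg (by simpa using hpx)]
      cases hre with
      | root _ _ _ =>
        rw [hfind]
        exact ⟨rfl, rfl, hB, fun k _ => Or.inl rfl, fun d z s _ h => h⟩
      | step _ _ _ hne _ => exact absurd hpx hne
    · cases hre with
      | root _ _ hx => exact absurd hx hpx
      | step _ _ _ hne hsub =>
        have hxl : x < (p.length : Int) := by
          by_contra hcon
          exact hpx (pvGetD_ge x hx0 hcon)
        have hpx0 : 0 ≤ PySem.List.pyGetD p x x := by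
          rw [pvGetD_lt x hx0 hxl]; exact (hB x.toNat (by omega)).1
        have hpxl : PySem.List.pyGetD p x x < (p.length : Int) := by
          rw [pvGetD_lt x hx0 hxl]; exact (hB x.toNat (by omega)).2
        obtain ⟨ha, hlen, hBnd, hvals, hpres⟩ := ih p (PySem.List.pyGetD p x x) r hB hpx0 hsub
        have hfind : ufFind (fuel + 1) p x =
            (PySem.List.pySetD (ufFind fuel p (PySem.List.pyGetD p x x)).1 x
              (ufFind fuel p (PySem.List.pyGetD p x x)).2,
             (ufFind fuel p (PySem.List.pyGetD p x x)).2) := by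
          simp only [ufFind]
          rw [if_pos (by simpa using hpx)]
        set q := (ufFind fuel p (PySem.List.pyGetD p x x)).1 with hq
        rw [hfind, ha]
        have hrb : 0 ≤ r ∧ r < (p.length : Int) := by
          have := pvReach_bounds hB hpx0 (by simpa using hpxl) hsub
          simpa using this
        have hqreach : pvReach q fuel (PySem.List.pyGetD p x x) r :=
          hpres fuel _ r hpx0 hsub
        have hqrroot : PySem.List.pyGetD q r r = r := pvReach_root_fix hqreach
        have hxr : x ≠ r := by
          intro hc; subst hc
          exact hpx (pvReach_root_fix hsub)
        -- value at x in q is px or r, both ≠ x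
        have hqx : q.getD x.toNat 0 = p.getD x.toNat 0 ∨ q.getD x.toNat 0 = r :=
          hvals x.toNat (by omega)
        have hqxget : PySem.List.pyGetD q x x = q.getD x.toNat 0 :=
          pvGetD_lt x hx0 (by rw [hlen]; exact hxl)
        have hpxget : PySem.List.pyGetD p x x = p.getD x.toNat 0 := pvGetD_lt x hx0 hxl
        have hqnr : PySem.List.pyGetD q x x ≠ x := by
          rw [hqxget]
          rcases hqx with h | h
          · rw [h, ← hpxget]; exact hpx
          · rw [h]; exact fun hc => hxr hc.symm
        have hqnext : ∀ (d : Nat) (s : Int), pvReach q d (PySem.List.pyGetD q x x) s → s = r := by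
          intro d s hds
          rcases hqx with h | h
          · rw [hqxget, h, ← hpxget] at hds
            exact pvReach_det hds hqreach
          · rw [hqxget, h] at hds
            exact pvReach_det hds (pvReach.root 0 r hqrroot)
        have hset := pvReach_set_root hBnd hx0 (by rw [hlen]; exact hxl) hrb.1 hqrroot hxr hqnr hqnext
        refine ⟨rfl, ?_, ?_, ?_, ?_⟩
        · rw [pvSet_len, hlen]
        · intro k hk
          rw [pvSet_len, hlen] at hk
          rw [pvSetD_getD r k hx0 (by omega)]
          split_ifs with hkx
          · exact ⟨hrb.1, by rw [pvSet_len, hlen]; exact hrb.2⟩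
          · have := hBnd k (by omega)
            rw [pvSet_len, hlen]
            rw [hlen] at this
            exact this
        · intro k hk
          rw [pvSetD_getD r k hx0 (by omega)]
          split_ifs with hkx
          · exact Or.inr rfl
          · exact hvals k hk
        · intro d z s hz0 hzs
          exact hset d z s hz0 (hpres d z s hz0 hzs)


-- The coupling invariant between A's union-find state (p, sz) and B's label array comp
def pvInv (n : Nat) (p sz comp : List Int) : Prop :=
  p.length = n ∧ sz.length = n ∧ comp.length = n ∧ pvBnd p ∧
  (∀ k : Nat, k < n → 0 ≤ comp.getD k 0 ∧ comp.getD k 0 < (n : Int) ∧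
    pvReach p ((sz.getD (comp.getD k 0).toNat 0).toNat - 1) (k : Int) (comp.getD k 0)) ∧
  (∀ r : Nat, r < n → comp.getD r 0 = (r : Int) →
    sz.getD r 0 = (((List.range n).countP (fun m => decide (comp.getD m 0 = (r : Int)))) : Int))

theorem pvInv_label_root {n : Nat} {p sz comp : List Int} (h : pvInv n p sz comp)
    {k : Nat} (hk : k < n) :
    comp.getD (comp.getD k 0).toNat 0 = comp.getD k 0 := by
  obtain ⟨hp, hs, hc, hB, h5, h6⟩ := h
  obtain ⟨h01, h02, hre⟩ := h5 k hk
  have hroot : PySem.List.pyGetD p (comp.getD k 0) (comp.getD k 0) = comp.getD k 0 :=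
    pvReach_root_fix hre
  obtain ⟨_, _, hre2⟩ := h5 (comp.getD k 0).toNat (by omega)
  have hcast : ((comp.getD k 0).toNat : Int) = comp.getD k 0 := by omega
  rw [hcast] at hre2
  exact pvReach_det hre2 (pvReach.root 0 _ hroot)

theorem pvInv_sz_bounds {n : Nat} {p sz comp : List Int} (h : pvInv n p sz comp)
    {k : Nat} (hk : k < n) :
    1 ≤ sz.getD (comp.getD k 0).toNat 0 ∧ sz.getD (comp.getD k 0).toNat 0 ≤ (n : Int) := by
  have hroot := pvInv_label_root h hk
  obtain ⟨hp, hs, hc, hB, h5, h6⟩ := h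
  obtain ⟨h01, h02, _⟩ := h5 k hk
  have hr : (comp.getD k 0).toNat < n := by omega
  have hcast : ((comp.getD k 0).toNat : Int) = comp.getD k 0 := by omega
  have h6r := h6 (comp.getD k 0).toNat hr (by rw [hcast]; exact hroot)
  rw [h6r]
  constructor
  · have : 0 < (List.range n).countP (fun m => decide (comp.getD m 0 = ((comp.getD k 0).toNat : Int))) := by
      rw [List.countP_pos_iff]
      refine ⟨(comp.getD k 0).toNat, List.mem_range.mpr hr, ?_⟩
      rw [decide_eq_true_eq, hcast]
      exact hroot
    omega
  · have : (List.range n).countP (fun m => decide (comp.getD m 0 = ((comp.getD k 0).toNat : Int))) ≤ n := by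
      have := List.countP_le_length (l := List.range n)
        (p := fun m => decide (comp.getD m 0 = ((comp.getD k 0).toNat : Int)))
      simpa using this
    omega

theorem pvInv_reach_full {n : Nat} {p sz comp : List Int} (h : pvInv n p sz comp)
    {k : Nat} (hk : k < n) :
    pvReach p p.length (k : Int) (comp.getD k 0) := by
  have hsz := pvInv_sz_bounds h hk
  obtain ⟨hp, hs, hc, hB, h5, h6⟩ := h
  obtain ⟨_, _, hre⟩ := h5 k hk
  exact pvReach_mono hre (by omega)


-- the two loop bodies, named for the proofs (definitionally the port lambdas)
def pvStepA (st : List Int × List Int) (t : Int × Int × Int) : List Int × List Int :=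
  let f1 := ufFind st.1.length st.1 t.1
  let f2 := ufFind f1.1.length f1.1 t.2.1
  if f1.2 ≠ f2.2 then ufUnion f2.1 st.2 t.1 t.2.1 else (f2.1, st.2)

def pvStepB (st : List Int × List Int) (t : Int × Int × Int) : List Int × List Int :=
  let ri := PySem.List.pyGetD st.1 t.2.1 0
  let rj := PySem.List.pyGetD st.1 t.2.2 0
  if ri ≠ rj then
    let pr := if PySem.List.pyGetD st.2 ri 0 < PySem.List.pyGetD st.2 rj 0 then (rj, ri)
              else (ri, rj)
    (st.1.map (fun c => if c = pr.2 then pr.1 else c),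
     PySem.List.pySetD st.2 pr.1 (PySem.List.pyGetD st.2 pr.1 0 + PySem.List.pyGetD st.2 pr.2 0))
  else st

-- (i, j, d) ↦ (d, i, j)
def pvG (t : Int × Int × Int) : Int × Int × Int := (t.2.2, t.1, t.2.1)

theorem pvGetD_map_if (comp : List Int) (f : Int → Int) (m : Nat) (hm : m < comp.length) :
    (comp.map f).getD m 0 = f (comp.getD m 0) := by
  rw [List.getD_eq_getElem _ 0 (n := m) (by simpa using hm), List.getD_eq_getElem _ 0 (n := m) hm,
    List.getElem_map]

theorem pvCountP_add {α : Type} (l : List α) (pp qq : α → Bool)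
    (h : ∀ a ∈ l, ¬(pp a = true ∧ qq a = true)) :
    l.countP (fun a => pp a || qq a) = l.countP pp + l.countP qq := by
  induction l with
  | nil => simp
  | cons a l ih =>
    have ha := h a (by simp)
    have ih' := ih (fun b hb => h b (by simp [hb]))
    simp only [List.countP_cons, ih']
    by_cases h1 : pp a = true <;> by_cases h2 : qq a = true <;>
      simp [h1, h2] at ha ⊢ <;> omega


-- reach-preserving rewrites of the parent array keep the whole invariant
theorem pvInv_pres {n : Nat} {p sz comp : List Int} (h : pvInv n p sz comp) {q : List Int}
    (hlen : q.length = p.length) (hBq : pvBnd q)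
    (hpres : ∀ (d : Nat) (z s : Int), 0 ≤ z → pvReach p d z s → pvReach q d z s) :
    pvInv n q sz comp := by
  obtain ⟨hp, hs, hc, hB, h5, h6⟩ := h
  refine ⟨by omega, hs, hc, hBq, ?_, h6⟩
  intro k hk
  obtain ⟨c0, cn, hre⟩ := h5 k hk
  exact ⟨c0, cn, hpres _ _ _ (by omega) hre⟩

-- one find call: returns comp's label, preserves the invariant and all reach facts
theorem pvFind_inv {n : Nat} {p sz comp : List Int} (h : pvInv n p sz comp) {x : Int}
    (hx0 : 0 ≤ x) (hxn : x < (n : Int)) :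
    (ufFind p.length p x).2 = comp.getD x.toNat 0 ∧
    pvInv n (ufFind p.length p x).1 sz comp ∧
    (∀ (d : Nat) (z s : Int), 0 ≤ z → pvReach p d z s →
      pvReach (ufFind p.length p x).1 d z s) := by
  have hx : x.toNat < n := by omega
  have hre : pvReach p p.length x (comp.getD x.toNat 0) := by
    have := pvInv_reach_full h hx
    rwa [(by omega : ((x.toNat : Nat) : Int) = x)] at this
  have hB : pvBnd p := h.2.2.2.1
  obtain ⟨e, hlen, hBq, _, hpres⟩ := ufFind_spec p.length p x (comp.getD x.toNat 0) hB hx0 hre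
  exact ⟨e, pvInv_pres h hlen hBq hpres, hpres⟩

-- merging label ry into label rx: both states move in lockstep
theorem pvUnion_inv {n : Nat} {p sz comp : List Int} (h : pvInv n p sz comp) {rx ry : Int}
    (hwx : ∃ k : Nat, k < n ∧ comp.getD k 0 = rx)
    (hwy : ∃ k : Nat, k < n ∧ comp.getD k 0 = ry)
    (hne : rx ≠ ry) :
    pvInv n (PySem.List.pySetD p ry rx)
      (PySem.List.pySetD sz rx (PySem.List.pyGetD sz rx 0 + PySem.List.pyGetD sz ry 0))
      (comp.map (fun c => if c = ry then rx else c)) := by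
  obtain ⟨kx, hkx, hkxv⟩ := hwx
  obtain ⟨ky, hky, hkyv⟩ := hwy
  have hlabelx : comp.getD rx.toNat 0 = rx := by
    have := pvInv_label_root h hkx; rwa [hkxv] at this
  have hlabely : comp.getD ry.toNat 0 = ry := by
    have := pvInv_label_root h hky; rwa [hkyv] at this
  have hszx := pvInv_sz_bounds h hkx
  have hszy := pvInv_sz_bounds h hky
  rw [hkxv] at hszx
  rw [hkyv] at hszy
  obtain ⟨hp, hs, hc, hB, h5, h6⟩ := h
  have hrxb : 0 ≤ rx ∧ rx < (n : Int) := by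
    obtain ⟨a, b, _⟩ := h5 kx hkx; rw [hkxv] at a b; exact ⟨a, b⟩
  have hryb : 0 ≤ ry ∧ ry < (n : Int) := by
    obtain ⟨a, b, _⟩ := h5 ky hky; rw [hkyv] at a b; exact ⟨a, b⟩
  have hrootx : PySem.List.pyGetD p rx rx = rx := by
    obtain ⟨_, _, hre⟩ := h5 kx hkx; rw [hkxv] at hre; exact pvReach_root_fix hre
  have hrooty : PySem.List.pyGetD p ry ry = ry := by
    obtain ⟨_, _, hre⟩ := h5 ky hky; rw [hkyv] at hre; exact pvReach_root_fix hre
  have husz := pvReach_set_union hB hrxb.1 hryb.1 (by omega) hrootx hrooty hne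
  have hgx : PySem.List.pyGetD sz rx 0 = sz.getD rx.toNat 0 :=
    pvGetD_lt 0 hrxb.1 (by omega)
  have hgy : PySem.List.pyGetD sz ry 0 = sz.getD ry.toNat 0 :=
    pvGetD_lt 0 hryb.1 (by omega)
  refine ⟨by simp [hp], by simp [hs], by simp [hc], ?_, ?_, ?_⟩
  · -- bounds of the new parent array
    intro k hk
    rw [PySem.List.length_pySetD] at hk ⊢
    rw [pvSetD_getD rx k hryb.1 (by omega)]
    split_ifs with hkr
    · exact ⟨hrxb.1, by omega⟩
    · exact hB k hk
  · -- reach facts with the sz-based depth budget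
    intro k hk
    have hck : (comp.map (fun c => if c = ry then rx else c)).getD k 0 =
        (if comp.getD k 0 = ry then rx else comp.getD k 0) :=
      pvGetD_map_if comp _ k (by omega)
    obtain ⟨c0, cn, hre⟩ := h5 k hk
    obtain ⟨u1, u2⟩ := husz _ _ _ (by omega) hre
    by_cases hcy : comp.getD k 0 = ry
    · rw [hck, if_pos hcy]
      refine ⟨hrxb.1, by omega, ?_⟩
      have hreach := u2 hcy
      have hs' : (PySem.List.pySetD sz rx
          (PySem.List.pyGetD sz rx 0 + PySem.List.pyGetD sz ry 0)).getD rx.toNat 0 =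
          PySem.List.pyGetD sz rx 0 + PySem.List.pyGetD sz ry 0 := by
        rw [pvSetD_getD _ rx.toNat hrxb.1 (by omega)]
        rw [if_pos (by omega)]
      rw [hs', hgx, hgy]
      refine pvReach_mono hreach ?_
      rw [hcy] at hre ⊢
      omega
    · rw [hck, if_neg hcy]
      refine ⟨c0, cn, ?_⟩
      have hreach := u1 hcy
      refine pvReach_mono hreach ?_
      rw [pvSetD_getD _ (comp.getD k 0).toNat hrxb.1 (by omega)]
      split_ifs with hcx
      · have hEq : (comp.getD k 0).toNat = rx.toNat := by omega
        rw [hEq, hgx, hgy]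
        omega
      · omega
  · -- size bookkeeping per root label
    intro r hr hroot'
    have hcr' : (comp.map (fun c => if c = ry then rx else c)).getD r 0 =
        (if comp.getD r 0 = ry then rx else comp.getD r 0) :=
      pvGetD_map_if comp _ r (by omega)
    rw [hcr'] at hroot'
    by_cases hcy : comp.getD r 0 = ry
    · exfalso
      rw [if_pos hcy] at hroot'
      have hEq : rx.toNat = r := by omega
      rw [← hEq, hlabelx] at hcy
      exact hne hcy
    · rw [if_neg hcy] at hroot'
      have hrny : (r : Int) ≠ ry := by rw [← hroot']; exact hcy
      by_cases hrx_eq : (r : Int) = rx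
      · -- the merged root: sizes add, counts add
        have hrtn : rx.toNat = r := by omega
        rw [pvSetD_getD _ r hrxb.1 (by omega), if_pos hrx_eq]
        have hcnt : (List.range n).countP
            (fun m => decide ((comp.map (fun c => if c = ry then rx else c)).getD m 0 = (r : Int)))
            = (List.range n).countP (fun m => decide (comp.getD m 0 = rx))
              + (List.range n).countP (fun m => decide (comp.getD m 0 = ry)) := by
          have hcg : (List.range n).countP
              (fun m => decide ((comp.map (fun c => if c = ry then rx else c)).getD m 0 = (r : Int)))
              = (List.range n).countP
                (fun m => decide (comp.getD m 0 = rx) || decide (comp.getD m 0 = ry)) := by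
            refine List.countP_congr ?_
            intro m hm
            have hmn : m < n := List.mem_range.mp hm
            rw [pvGetD_map_if comp _ m (by omega)]
            by_cases hmy : comp.getD m 0 = ry
            · simp only [hmy, hrx_eq, decide_eq_true_eq, Bool.or_eq_true]
              tauto
            · simp only [if_neg hmy, hrx_eq, decide_eq_true_eq, Bool.or_eq_true]
              tauto
          rw [hcg]
          exact pvCountP_add (List.range n) _ _
            (fun a _ => by
              simp only [decide_eq_true_eq]
              rintro ⟨e1, e2⟩
              rw [e1] at e2
              exact hne e2)
        rw [hcnt, hgx, hgy]
        have h6x : sz.getD rx.toNat 0 =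
            (((List.range n).countP (fun m => decide (comp.getD m 0 = rx))) : Int) := by
          have := h6 rx.toNat (by omega) (by rw [(by omega : ((rx.toNat : Nat) : Int) = rx)]; exact hlabelx)
          rwa [(by omega : ((rx.toNat : Nat) : Int) = rx)] at this
        have h6y : sz.getD ry.toNat 0 =
            (((List.range n).countP (fun m => decide (comp.getD m 0 = ry))) : Int) := by
          have := h6 ry.toNat (by omega) (by rw [(by omega : ((ry.toNat : Nat) : Int) = ry)]; exact hlabely)
          rwa [(by omega : ((ry.toNat : Nat) : Int) = ry)] at this
        rw [h6x, h6y]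
        push_cast
        ring
      · -- an untouched root label
        rw [pvSetD_getD _ r hrxb.1 (by omega), if_neg (by omega)]
        have hcg : (List.range n).countP
            (fun m => decide ((comp.map (fun c => if c = ry then rx else c)).getD m 0 = (r : Int)))
            = (List.range n).countP (fun m => decide (comp.getD m 0 = (r : Int))) := by
          refine List.countP_congr ?_
          intro m hm
          have hmn : m < n := List.mem_range.mp hm
          rw [pvGetD_map_if comp _ m (by omega)]
          by_cases hmy : comp.getD m 0 = ry
          · simp only [hmy, decide_eq_true_eq]
            constructor
            · intro h; exact absurd h.symm hrx_eq
            · intro h; exact absurd (hmy ▸ h.symm) hrny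
          · rw [if_neg hmy]
        rw [hcg]
        exact h6 r hr hroot'


-- one loop iteration keeps the two states in lockstep
theorem pvStep_rel {n : Nat} {p sz comp : List Int} (hΦ : pvInv n p sz comp)
    (t : Int × Int × Int) (hi0 : 0 ≤ t.1) (hin : t.1 < (n : Int))
    (hj0 : 0 ≤ t.2.1) (hjn : t.2.1 < (n : Int)) :
    (pvStepA (p, sz) t).2 = (pvStepB (comp, sz) (pvG t)).2 ∧
    pvInv n (pvStepA (p, sz) t).1 (pvStepA (p, sz) t).2 (pvStepB (comp, sz) (pvG t)).1 := by
  have hp : p.length = n := hΦ.1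
  have hc : comp.length = n := hΦ.2.2.1
  obtain ⟨e1, hΦ1, pres1⟩ := pvFind_inv hΦ hi0 hin
  obtain ⟨e2, hΦ2, pres2⟩ := pvFind_inv hΦ1 hj0 hjn
  have hgi : PySem.List.pyGetD comp t.1 0 = comp.getD t.1.toNat 0 :=
    pvGetD_lt 0 hi0 (by omega)
  have hgj : PySem.List.pyGetD comp t.2.1 0 = comp.getD t.2.1.toNat 0 :=
    pvGetD_lt 0 hj0 (by omega)
  by_cases hrij : comp.getD t.1.toNat 0 = comp.getD t.2.1.toNat 0
  · have hA' : pvStepA (p, sz) t =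
        ((ufFind (ufFind p.length p t.1).1.length (ufFind p.length p t.1).1 t.2.1).1, sz) := by
      simp only [pvStepA]
      rw [e1, e2, if_neg (not_not_intro hrij)]
    have hB' : pvStepB (comp, sz) (pvG t) = (comp, sz) := by
      simp only [pvStepB, pvG]
      rw [hgi, hgj, if_neg (not_not_intro hrij)]
    rw [hA', hB']
    exact ⟨rfl, hΦ2⟩
  · obtain ⟨e3, hΦ3, pres3⟩ := pvFind_inv hΦ2 hi0 hin
    obtain ⟨e4, hΦ4, pres4⟩ := pvFind_inv hΦ3 hj0 hjn
    have hA' : pvStepA (p, sz) t =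
        (PySem.List.pySetD
          (ufFind (ufFind (ufFind (ufFind p.length p t.1).1.length (ufFind p.length p t.1).1 t.2.1).1.length
            (ufFind (ufFind p.length p t.1).1.length (ufFind p.length p t.1).1 t.2.1).1 t.1).1.length
            (ufFind (ufFind (ufFind p.length p t.1).1.length (ufFind p.length p t.1).1 t.2.1).1.length
            (ufFind (ufFind p.length p t.1).1.length (ufFind p.length p t.1).1 t.2.1).1 t.1).1 t.2.1).1
          (if PySem.List.pyGetD sz (comp.getD t.1.toNat 0) 0 < PySem.List.pyGetD sz (comp.getD t.2.1.toNat 0) 0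
            then (comp.getD t.2.1.toNat 0, comp.getD t.1.toNat 0)
            else (comp.getD t.1.toNat 0, comp.getD t.2.1.toNat 0)).2
          (if PySem.List.pyGetD sz (comp.getD t.1.toNat 0) 0 < PySem.List.pyGetD sz (comp.getD t.2.1.toNat 0) 0
            then (comp.getD t.2.1.toNat 0, comp.getD t.1.toNat 0)
            else (comp.getD t.1.toNat 0, comp.getD t.2.1.toNat 0)).1,
         PySem.List.pySetD sz
          (if PySem.List.pyGetD sz (comp.getD t.1.toNat 0) 0 < PySem.List.pyGetD sz (comp.getD t.2.1.toNat 0) 0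
            then (comp.getD t.2.1.toNat 0, comp.getD t.1.toNat 0)
            else (comp.getD t.1.toNat 0, comp.getD t.2.1.toNat 0)).1
          (PySem.List.pyGetD sz
            (if PySem.List.pyGetD sz (comp.getD t.1.toNat 0) 0 < PySem.List.pyGetD sz (comp.getD t.2.1.toNat 0) 0
              then (comp.getD t.2.1.toNat 0, comp.getD t.1.toNat 0)
              else (comp.getD t.1.toNat 0, comp.getD t.2.1.toNat 0)).1 0 +
           PySem.List.pyGetD sz
            (if PySem.List.pyGetD sz (comp.getD t.1.toNat 0) 0 < PySem.List.pyGetD sz (comp.getD t.2.1.toNat 0) 0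
              then (comp.getD t.2.1.toNat 0, comp.getD t.1.toNat 0)
              else (comp.getD t.1.toNat 0, comp.getD t.2.1.toNat 0)).2 0)) := by
      simp only [pvStepA]
      rw [e1, e2, if_pos hrij]
      simp only [ufUnion]
      rw [e3, e4, if_pos hrij]
    have hB' : pvStepB (comp, sz) (pvG t) =
        (comp.map (fun c =>
          if c = (if PySem.List.pyGetD sz (comp.getD t.1.toNat 0) 0 < PySem.List.pyGetD sz (comp.getD t.2.1.toNat 0) 0
              then (comp.getD t.2.1.toNat 0, comp.getD t.1.toNat 0)
              else (comp.getD t.1.toNat 0, comp.getD t.2.1.toNat 0)).2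
          then (if PySem.List.pyGetD sz (comp.getD t.1.toNat 0) 0 < PySem.List.pyGetD sz (comp.getD t.2.1.toNat 0) 0
              then (comp.getD t.2.1.toNat 0, comp.getD t.1.toNat 0)
              else (comp.getD t.1.toNat 0, comp.getD t.2.1.toNat 0)).1
          else c),
         PySem.List.pySetD sz
          (if PySem.List.pyGetD sz (comp.getD t.1.toNat 0) 0 < PySem.List.pyGetD sz (comp.getD t.2.1.toNat 0) 0
            then (comp.getD t.2.1.toNat 0, comp.getD t.1.toNat 0)
            else (comp.getD t.1.toNat 0, comp.getD t.2.1.toNat 0)).1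
          (PySem.List.pyGetD sz
            (if PySem.List.pyGetD sz (comp.getD t.1.toNat 0) 0 < PySem.List.pyGetD sz (comp.getD t.2.1.toNat 0) 0
              then (comp.getD t.2.1.toNat 0, comp.getD t.1.toNat 0)
              else (comp.getD t.1.toNat 0, comp.getD t.2.1.toNat 0)).1 0 +
           PySem.List.pyGetD sz
            (if PySem.List.pyGetD sz (comp.getD t.1.toNat 0) 0 < PySem.List.pyGetD sz (comp.getD t.2.1.toNat 0) 0
              then (comp.getD t.2.1.toNat 0, comp.getD t.1.toNat 0)
              else (comp.getD t.1.toNat 0, comp.getD t.2.1.toNat 0)).2 0)) := by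
      simp only [pvStepB, pvG]
      rw [hgi, hgj, if_pos hrij]
    rw [hA', hB']
    refine ⟨rfl, ?_⟩
    have hprcases :
        ((if PySem.List.pyGetD sz (comp.getD t.1.toNat 0) 0 < PySem.List.pyGetD sz (comp.getD t.2.1.toNat 0) 0
            then (comp.getD t.2.1.toNat 0, comp.getD t.1.toNat 0)
            else (comp.getD t.1.toNat 0, comp.getD t.2.1.toNat 0)).1 = comp.getD t.1.toNat 0 ∧
         (if PySem.List.pyGetD sz (comp.getD t.1.toNat 0) 0 < PySem.List.pyGetD sz (comp.getD t.2.1.toNat 0) 0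
            then (comp.getD t.2.1.toNat 0, comp.getD t.1.toNat 0)
            else (comp.getD t.1.toNat 0, comp.getD t.2.1.toNat 0)).2 = comp.getD t.2.1.toNat 0) ∨
        ((if PySem.List.pyGetD sz (comp.getD t.1.toNat 0) 0 < PySem.List.pyGetD sz (comp.getD t.2.1.toNat 0) 0
            then (comp.getD t.2.1.toNat 0, comp.getD t.1.toNat 0)
            else (comp.getD t.1.toNat 0, comp.getD t.2.1.toNat 0)).1 = comp.getD t.2.1.toNat 0 ∧
         (if PySem.List.pyGetD sz (comp.getD t.1.toNat 0) 0 < PySem.List.pyGetD sz (comp.getD t.2.1.toNat 0) 0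
            then (comp.getD t.2.1.toNat 0, comp.getD t.1.toNat 0)
            else (comp.getD t.1.toNat 0, comp.getD t.2.1.toNat 0)).2 = comp.getD t.1.toNat 0) := by
      split_ifs <;> simp
    have hwx : ∃ k : Nat, k < n ∧ comp.getD k 0 =
        (if PySem.List.pyGetD sz (comp.getD t.1.toNat 0) 0 < PySem.List.pyGetD sz (comp.getD t.2.1.toNat 0) 0
          then (comp.getD t.2.1.toNat 0, comp.getD t.1.toNat 0)
          else (comp.getD t.1.toNat 0, comp.getD t.2.1.toNat 0)).1 := by
      rcases hprcases with ⟨a, _⟩ | ⟨a, _⟩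
      · exact ⟨t.1.toNat, by omega, by rw [a]⟩
      · exact ⟨t.2.1.toNat, by omega, by rw [a]⟩
    have hwy : ∃ k : Nat, k < n ∧ comp.getD k 0 =
        (if PySem.List.pyGetD sz (comp.getD t.1.toNat 0) 0 < PySem.List.pyGetD sz (comp.getD t.2.1.toNat 0) 0
          then (comp.getD t.2.1.toNat 0, comp.getD t.1.toNat 0)
          else (comp.getD t.1.toNat 0, comp.getD t.2.1.toNat 0)).2 := by
      rcases hprcases with ⟨_, b⟩ | ⟨_, b⟩
      · exact ⟨t.2.1.toNat, by omega, by rw [b]⟩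
      · exact ⟨t.1.toNat, by omega, by rw [b]⟩
    have hne' :
        (if PySem.List.pyGetD sz (comp.getD t.1.toNat 0) 0 < PySem.List.pyGetD sz (comp.getD t.2.1.toNat 0) 0
          then (comp.getD t.2.1.toNat 0, comp.getD t.1.toNat 0)
          else (comp.getD t.1.toNat 0, comp.getD t.2.1.toNat 0)).1 ≠
        (if PySem.List.pyGetD sz (comp.getD t.1.toNat 0) 0 < PySem.List.pyGetD sz (comp.getD t.2.1.toNat 0) 0
          then (comp.getD t.2.1.toNat 0, comp.getD t.1.toNat 0)
          else (comp.getD t.1.toNat 0, comp.getD t.2.1.toNat 0)).2 := by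
      rcases hprcases with ⟨a, b⟩ | ⟨a, b⟩ <;> rw [a, b]
      · exact hrij
      · exact fun h => hrij h.symm
    exact pvUnion_inv hΦ4 hwx hwy hne'


-- the whole edge loop keeps the two states in lockstep
theorem pvFold_rel {n : Nat} (l : List (Int × Int × Int))
    (hl : ∀ t ∈ l, 0 ≤ t.1 ∧ t.1 < (n : Int) ∧ 0 ≤ t.2.1 ∧ t.2.1 < (n : Int))
    {p sz comp : List Int} (hΦ : pvInv n p sz comp) :
    (l.foldl pvStepA (p, sz)).2 = ((l.map pvG).foldl pvStepB (comp, sz)).2 ∧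
    pvInv n (l.foldl pvStepA (p, sz)).1 (l.foldl pvStepA (p, sz)).2
      ((l.map pvG).foldl pvStepB (comp, sz)).1 := by
  induction l generalizing p sz comp with
  | nil => exact ⟨rfl, hΦ⟩
  | cons t l ih =>
    obtain ⟨h1, h2, h3, h4⟩ := hl t (by simp)
    obtain ⟨hsz, hΦ'⟩ := pvStep_rel hΦ t h1 h2 h3 h4
    simp only [List.foldl_cons, List.map_cons]
    have eB : pvStepB (comp, sz) (pvG t) =
        ((pvStepB (comp, sz) (pvG t)).1, (pvStepA (p, sz) t).2) := by
      rw [hsz]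
    rw [eB]
    exact ih (fun u hu => hl u (by simp [hu])) hΦ'

-- the two initial states satisfy the invariant
theorem pvInv_init (n : Nat) :
    pvInv n (PySem.List.pyRange 0 (n : Int) 1) (List.replicate n (1 : Int))
      (PySem.List.pyRange 0 (n : Int) 1) := by
  have hlen : (PySem.List.pyRange 0 (n : Int) 1).length = n := by
    rw [PySem.List.length_pyRange_one]; omega
  have hget : ∀ k : Nat, k < n → (PySem.List.pyRange 0 (n : Int) 1).getD k 0 = (k : Int) := by
    intro k hk
    rw [List.getD_eq_getElem _ 0 (n := k) (by omega)]
    rw [PySem.List.getElem_pyRange_one]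
    simp
  have hszget : ∀ k : Nat, k < n → (List.replicate n (1 : Int)).getD k 0 = 1 := by
    intro k hk
    rw [List.getD_eq_getElem _ 0 (n := k) (by simpa using hk)]
    simp
  refine ⟨hlen, by simp, hlen, ?_, ?_, ?_⟩
  · intro k hk
    rw [hlen] at hk
    rw [hget k hk, hlen]
    omega
  · intro k hk
    rw [hget k hk]
    refine ⟨by omega, by omega, ?_⟩
    have ht : ((k : Int)).toNat = k := by omega
    rw [ht, hszget k hk]
    refine pvReach.root _ _ ?_
    rw [pvGetD_lt _ (by omega : (0:Int) ≤ (k:Int)) (by omega)]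
    exact hget k hk
  · intro r hr hroot
    rw [hszget r hr]
    have hcg : (List.range n).countP
        (fun m => decide ((PySem.List.pyRange 0 (n : Int) 1).getD m 0 = (r : Int)))
        = (List.range n).countP (fun m => decide (m = r)) := by
      refine List.countP_congr ?_
      intro m hm
      rw [hget m (List.mem_range.mp hm)]
      simp
    rw [hcg]
    have h1 : (List.range n).countP (fun m => decide (m = r)) = (List.range n).count r := by
      rw [List.count_eq_countP]
      refine List.countP_congr ?_
      intro m _
      simp
    have h2 : (List.range n).count r = 1 :=
      List.count_eq_one_of_mem List.nodup_range (List.mem_range.mpr hr)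
    rw [h1, h2]
    simp


-- comparator correspondence: B's plain tuple order on (d,i,j) is A's keyed order
theorem pvLt_corr (a b : Int × Int × Int) : pvLtB (pvG a) (pvG b) = pvKeyLtA a b := rfl

theorem pvInsertBy_map (x : Int × Int × Int) (ys : List (Int × Int × Int)) :
    (PySem.List.insertBy pvKeyLtA x ys).map pvG =
      PySem.List.insertBy pvLtB (pvG x) (ys.map pvG) := by
  induction ys with
  | nil => rfl
  | cons y ys ih =>
    simp only [PySem.List.insertBy, List.map_cons, pvLt_corr]
    by_cases h : pvKeyLtA x y = true
    · rw [if_pos h, if_pos h]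
      simp
    · rw [if_neg h, if_neg h]
      simp only [List.map_cons, ih]

theorem pvSort_map (xs : List (Int × Int × Int)) :
    pvSortB (xs.map pvG) = (pvSortA xs).map pvG := by
  unfold pvSortA pvSortB
  have h : ∀ acc : List (Int × Int × Int),
      (xs.map pvG).foldl (fun acc x => PySem.List.insertBy pvLtB x acc) (acc.map pvG) =
      (xs.foldl (fun acc x => PySem.List.insertBy pvKeyLtA x acc) acc).map pvG := by
    induction xs with
    | nil => intro acc; rfl
    | cons x xs ih =>
      intro acc
      simp only [List.map_cons, List.foldl_cons]
      rw [← pvInsertBy_map, ih]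
  simpa using h []

theorem pvSlice_map (xs : List (Int × Int × Int)) (b : Int) :
    PySem.List.slice (xs.map pvG) none (some b) =
      (PySem.List.slice xs none (some b)).map pvG := by
  by_cases hb : 0 ≤ b
  · rw [PySem.List.slice_to _ hb, PySem.List.slice_to _ hb, List.map_take]
  · have hk : b = -(((-b).toNat : Nat) : Int) := by omega
    have hk0 : 0 < (-b).toNat := by omega
    rw [hk, PySem.List.slice_to_neg_natCast _ _ hk0, PySem.List.slice_to_neg_natCast _ _ hk0,
      List.length_map, List.map_take]

-- the pair list, in flatMap form, and B's pair list as its image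
theorem pvPairsA_eq (boxes : List (List Int)) :
    find_closest_pairs boxes =
      (PySem.List.pyRange 0 (PySem.List.len boxes) 1).flatMap (fun i =>
        (PySem.List.pyRange (i + 1) (PySem.List.len boxes) 1).map (fun j =>
          (i, j, pvDist (PySem.List.pyGetD boxes i []) (PySem.List.pyGetD boxes j [])))) := by
  unfold find_closest_pairs
  simp only [PySem.List.foldl_append_singleton_eq_map]
  rw [PySem.List.foldl_append_eq_flatMap]
  simp

theorem pvPairsB_eq (boxes : List (List Int)) :
    pvPairsB boxes = (find_closest_pairs boxes).map pvG := by
  unfold pvPairsB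
  simp only [PySem.List.foldl_append_singleton_eq_map]
  rw [PySem.List.foldl_append_eq_flatMap]
  rw [pvPairsA_eq]
  simp only [List.map_flatMap, List.map_map]
  rfl

theorem pvPairsA_mem (boxes : List (List Int)) (t : Int × Int × Int)
    (ht : t ∈ find_closest_pairs boxes) :
    0 ≤ t.1 ∧ t.1 < (boxes.length : Int) ∧ 0 ≤ t.2.1 ∧ t.2.1 < (boxes.length : Int) := by
  rw [pvPairsA_eq] at ht
  obtain ⟨i, hi, ht⟩ := List.mem_flatMap.mp ht
  obtain ⟨j, hj, rfl⟩ := List.mem_map.mp ht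
  rw [PySem.List.mem_pyRange_one] at hi hj
  simp only [PySem.List.len_eq] at hi hj
  refine ⟨?_, ?_, ?_, ?_⟩ <;> dsimp only <;> omega

theorem pvFoldl_insertBy_mem :
    ∀ (xs acc : List (Int × Int × Int)) (t : Int × Int × Int),
      t ∈ xs.foldl (fun acc x => PySem.List.insertBy pvKeyLtA x acc) acc → t ∈ acc ∨ t ∈ xs
  | [], _, _, h => Or.inl h
  | x :: xs, acc, t, h => by
    rw [List.foldl_cons] at h
    rcases pvFoldl_insertBy_mem xs _ t h with h' | h'
    · rcases (PySem.List.mem_insertBy _ _ _ _).mp h' with h'' | h''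
      · exact Or.inr (by simp [h''])
      · exact Or.inl h''
    · exact Or.inr (by simp [h'])

theorem pvSortA_mem (xs : List (Int × Int × Int)) (t : Int × Int × Int)
    (ht : t ∈ pvSortA xs) : t ∈ xs := by
  unfold pvSortA at ht
  rcases pvFoldl_insertBy_mem xs [] t ht with h' | h'
  · simp at h'
  · exact h'


-- A's closing loop only reads roots: its dict is the label counter
theorem pvFinalA {n : Nat} {sz comp : List Int} :
    ∀ (l : List Int), (∀ i ∈ l, 0 ≤ i ∧ i < (n : Int)) →
    ∀ (p : List Int) (d : PySem.Dict Int Int), pvInv n p sz comp →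
    (l.foldl (fun st i =>
        let f := ufFind st.1.length st.1 i
        (f.1, st.2.insert f.2 (st.2.getD f.2 0 + 1))) (p, d)).2
      = l.foldl (fun d i =>
          d.insert (PySem.List.pyGetD comp i 0) (d.getD (PySem.List.pyGetD comp i 0) 0 + 1)) d := by
  intro l
  induction l with
  | nil => intro _ p d _; rfl
  | cons i l ih =>
    intro hl p d hΦ
    obtain ⟨hi0, hin⟩ := hl i (by simp)
    obtain ⟨e, hΦ1, _⟩ := pvFind_inv hΦ hi0 hin
    have hgi : PySem.List.pyGetD comp i 0 = comp.getD i.toNat 0 :=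
      pvGetD_lt 0 hi0 (by have := hΦ.2.2.1; omega)
    rw [List.foldl_cons, List.foldl_cons]
    have hstep : (let f := ufFind (p, d).1.length (p, d).1 i
        ((f.1, (p, d).2.insert f.2 ((p, d).2.getD f.2 0 + 1)) : List Int × PySem.Dict Int Int)) =
        ((ufFind p.length p i).1,
         d.insert (PySem.List.pyGetD comp i 0) (d.getD (PySem.List.pyGetD comp i 0) 0 + 1)) := by
      show ((ufFind p.length p i).1,
        d.insert (ufFind p.length p i).2 (d.getD (ufFind p.length p i).2 0 + 1)) = _
      rw [e, hgi]
    rw [hstep]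
    exact ih (fun u hu => hl u (by simp [hu])) _ _ hΦ1

-- Set.update only appends
theorem pvUpdate_prefix :
    ∀ (ks : List Int) (s : PySem.Set Int), ∃ t, PySem.Set.update s ks = s ++ t := by
  intro ks
  induction ks with
  | nil => exact fun s => ⟨[], by simp [PySem.Set.update]⟩
  | cons r ks ih =>
    intro s
    have hupd : PySem.Set.update s (r :: ks) = PySem.Set.update (PySem.Set.add s r) ks := rfl
    obtain ⟨t, ht⟩ := ih (PySem.Set.add s r)
    by_cases hr : r ∈ s
    · have hadd : PySem.Set.add s r = s := by
        simp [PySem.Set.add, PySem.Set.contains, hr]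
      exact ⟨t, by rw [hupd, ht, hadd]⟩
    · have hadd : PySem.Set.add s r = s ++ [r] := by
        simp [PySem.Set.add, PySem.Set.contains, hr]
      exact ⟨[r] ++ t, by rw [hupd, ht, hadd]; simp⟩

-- B's closing loop emits one size per first-seen label
theorem pvSeenFold (L : Int → Int) :
    ∀ (ks : List Int) (out : List Int) (s : PySem.Set Int),
      ks.foldl (fun acc r => if r ∈ acc.2 then acc else (acc.1 ++ [L r], PySem.Set.add acc.2 r))
        (out, s)
      = (out ++ ((PySem.Set.update s ks).drop s.length).map L, PySem.Set.update s ks) := by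
  intro ks
  induction ks with
  | nil => intro out s; simp [PySem.Set.update]
  | cons r ks ih =>
    intro out s
    rw [List.foldl_cons]
    have hupd : PySem.Set.update s (r :: ks) = PySem.Set.update (PySem.Set.add s r) ks := rfl
    by_cases hr : r ∈ s
    · have hadd : PySem.Set.add s r = s := by
        simp [PySem.Set.add, PySem.Set.contains, hr]
      rw [if_pos hr, hupd, hadd]
      exact ih out s
    · have hadd : PySem.Set.add s r = s ++ [r] := by
        simp [PySem.Set.add, PySem.Set.contains, hr]
      rw [if_neg hr, hupd, hadd]
      rw [ih (out ++ [L r]) (s ++ [r])]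
      obtain ⟨t, ht⟩ := pvUpdate_prefix ks (s ++ [r])
      rw [ht]
      have h1 : (s ++ [r] ++ t).drop (s ++ [r]).length = t := List.drop_left
      have h2 : (s ++ [r] ++ t).drop s.length = [r] ++ t := by
        rw [List.append_assoc]
        exact List.drop_left
      rw [h1, h2]
      simp


-- each first-seen label's multiplicity in the root list is its stored size
theorem pvCounts_eq {n : Nat} {p sz comp : List Int} (hΦ : pvInv n p sz comp) (r : Int)
    (hmem : r ∈ (PySem.List.pyRange 0 (n : Int) 1).map (fun i => PySem.List.pyGetD comp i 0)) :
    ((((PySem.List.pyRange 0 (n : Int) 1).map (fun i => PySem.List.pyGetD comp i 0)).count r : Nat) : Int)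
      = PySem.List.pyGetD sz r 0 := by
  have hc : comp.length = n := hΦ.2.2.1
  have hs : sz.length = n := hΦ.2.1
  obtain ⟨i, hi, hri⟩ := List.mem_map.mp hmem
  rw [PySem.List.mem_pyRange_one] at hi
  have hgi : PySem.List.pyGetD comp i 0 = comp.getD i.toNat 0 :=
    pvGetD_lt 0 hi.1 (by omega)
  have h5i := hΦ.2.2.2.2.1 i.toNat (by omega)
  obtain ⟨hr0, hrn, _⟩ := h5i
  have hrval : r = comp.getD i.toNat 0 := by rw [← hri, hgi]
  have hlabel : comp.getD r.toNat 0 = r := by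
    rw [hrval]
    exact pvInv_label_root hΦ (by omega)
  have hR : PySem.List.pyGetD sz r 0 = sz.getD r.toNat 0 :=
    pvGetD_lt 0 (by omega) (by omega)
  have h6r := hΦ.2.2.2.2.2 r.toNat (by omega)
    (by rw [(by omega : ((r.toNat : Nat) : Int) = r)]; exact hlabel)
  rw [(by omega : ((r.toNat : Nat) : Int) = r)] at h6r
  rw [hR, h6r]
  -- left side: the count over the mapped range list
  have hcount : ((PySem.List.pyRange 0 (n : Int) 1).map (fun i => PySem.List.pyGetD comp i 0)).count r
      = (List.range n).countP (fun m => decide (comp.getD m 0 = r)) := by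
    rw [List.count_eq_countP, List.countP_map, PySem.List.pyRange_zero_natCast, List.countP_map]
    refine List.countP_congr ?_
    intro m hm
    have hmn : m < n := List.mem_range.mp hm
    simp only [Function.comp]
    rw [pvGetD_lt 0 (by omega) (by omega)]
    rw [(by omega : ((m : Int)).toNat = m)]
    simp
  rw [hcount]

-- ===== VERDICT (by name: the statement is the Claim_ definition above) =====
theorem connect_circuits_spec : Claim_equal_connect_circuits := by
  unfold Claim_equal_connect_circuits Spec_connect_circuits
  intro boxes nc _
  set n := boxes.length with hn
  set l := PySem.List.slice (pvSortA (find_closest_pairs boxes)) none (some nc) with hld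
  have hlB : PySem.List.slice (pvSortB (pvPairsB boxes)) none (some nc) = l.map pvG := by
    rw [pvPairsB_eq, pvSort_map, pvSlice_map]
  set stA := l.foldl pvStepA
    (PySem.List.pyRange 0 (n : Int) 1, List.replicate n (1 : Int)) with hstA
  set stB0 := (PySem.List.slice (pvSortB (pvPairsB boxes)) none (some nc)).foldl pvStepB
    (PySem.List.pyRange 0 (n : Int) 1, List.replicate n (1 : Int)) with hstB0
  have hstB : stB0 = (l.map pvG).foldl pvStepB
      (PySem.List.pyRange 0 (n : Int) 1, List.replicate n (1 : Int)) := by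
    rw [hstB0, hlB]
  have hl : ∀ t ∈ l, 0 ≤ t.1 ∧ t.1 < (n : Int) ∧ 0 ≤ t.2.1 ∧ t.2.1 < (n : Int) :=
    fun t ht => pvPairsA_mem boxes t (pvSortA_mem _ t (PySem.List.mem_of_mem_slice _ _ _ ht))
  obtain ⟨hsz, hΦend⟩ := pvFold_rel l hl (pvInv_init n)
  rw [← hstA, ← hstB] at hsz hΦend
  -- both ports, reduced to their closing loops over the computed states
  have hA : connect_circuits boxes nc =
      ((PySem.List.pyRange 0 (n : Int) 1).foldl
        (fun st i =>
          let f := ufFind st.1.length st.1 i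
          (f.1, st.2.insert f.2 (st.2.getD f.2 0 + 1)))
        (stA.1, (PySem.Dict.empty : PySem.Dict Int Int))).2.values := rfl
  have hB : connect_circuits_alt boxes nc =
      ((PySem.List.pyRange 0 (n : Int) 1).foldl
        (fun acc i =>
          if PySem.List.pyGetD stB0.1 i 0 ∈ acc.2 then acc
          else (acc.1 ++ [PySem.List.pyGetD stB0.2 (PySem.List.pyGetD stB0.1 i 0) 0],
            PySem.Set.add acc.2 (PySem.List.pyGetD stB0.1 i 0)))
        (([] : List Int), (PySem.Set.empty : PySem.Set Int))).1 := rfl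
  rw [hA, hB]
  have hrange : ∀ i ∈ PySem.List.pyRange 0 (n : Int) 1, 0 ≤ i ∧ i < (n : Int) := by
    intro i hi
    rw [PySem.List.mem_pyRange_one] at hi
    exact hi
  set ks := (PySem.List.pyRange 0 (n : Int) 1).map
    (fun i => PySem.List.pyGetD stB0.1 i 0) with hks
  calc ((PySem.List.pyRange 0 (n : Int) 1).foldl
        (fun st i =>
          let f := ufFind st.1.length st.1 i
          (f.1, st.2.insert f.2 (st.2.getD f.2 0 + 1)))
        (stA.1, (PySem.Dict.empty : PySem.Dict Int Int))).2.values
      = (PySem.Dict.counter ks).values := by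
        rw [pvFinalA (PySem.List.pyRange 0 (n : Int) 1) hrange stA.1 _ hΦend]
        exact congrArg PySem.Dict.values
          ((List.foldl_map (f := fun i : Int => PySem.List.pyGetD stB0.1 i 0)
            (g := fun (d : PySem.Dict Int Int) x => d.insert x (d.getD x 0 + 1))
            (l := PySem.List.pyRange 0 (n : Int) 1)
            (init := PySem.Dict.empty)).symm.trans
            (PySem.Dict.foldl_insert_getD_add_one_eq_counter ks))
    _ = (PySem.Set.ofList ks).map (fun k => ((ks.count k : Nat) : Int)) := by
        simp [PySem.Dict.values, PySem.Dict.items_counter, List.map_map, Function.comp]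
    _ = (PySem.Set.ofList ks).map (fun r => PySem.List.pyGetD stB0.2 r 0) := by
        refine List.map_congr_left ?_
        intro r hr
        have hrmem : r ∈ ks := (PySem.Set.mem_ofList ks r).mp hr
        have hcount := pvCounts_eq hΦend r (hks ▸ hrmem)
        rw [← hks] at hcount
        rw [hcount, hsz]
    _ = ((PySem.List.pyRange 0 (n : Int) 1).foldl
        (fun acc i =>
          if PySem.List.pyGetD stB0.1 i 0 ∈ acc.2 then acc
          else (acc.1 ++ [PySem.List.pyGetD stB0.2 (PySem.List.pyGetD stB0.1 i 0) 0],
            PySem.Set.add acc.2 (PySem.List.pyGetD stB0.1 i 0)))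
        (([] : List Int), (PySem.Set.empty : PySem.Set Int))).1 := by
        have h1 : (PySem.List.pyRange 0 (n : Int) 1).foldl
            (fun acc i =>
              if PySem.List.pyGetD stB0.1 i 0 ∈ acc.2 then acc
              else (acc.1 ++ [PySem.List.pyGetD stB0.2 (PySem.List.pyGetD stB0.1 i 0) 0],
                PySem.Set.add acc.2 (PySem.List.pyGetD stB0.1 i 0)))
            (([] : List Int), (PySem.Set.empty : PySem.Set Int))
            = ks.foldl (fun acc r =>
                if r ∈ acc.2 then acc
                else (acc.1 ++ [PySem.List.pyGetD stB0.2 r 0], PySem.Set.add acc.2 r))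
              (([] : List Int), (PySem.Set.empty : PySem.Set Int)) :=
          (List.foldl_map (f := fun i : Int => PySem.List.pyGetD stB0.1 i 0)
            (g := fun (acc : List Int × PySem.Set Int) r =>
              if r ∈ acc.2 then acc
              else (acc.1 ++ [PySem.List.pyGetD stB0.2 r 0], PySem.Set.add acc.2 r))
            (l := PySem.List.pyRange 0 (n : Int) 1)
            (init := (([] : List Int), (PySem.Set.empty : PySem.Set Int)))).symm
        rw [h1, pvSeenFold]
        rfl
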